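-- pv_equiv track=rewrite | github.com/MrHamdulay/csc3-capstone | examples/data/Assignment_9/ksskou001/question3.py | vert_check
-- ===== SOURCE A (Python) =====
-- def vert_check(grid):
--     '''return True if no 2 cells in the same column have the same value, otherwise
--         return False'''
--
--     for i in range(len(grid)):
--         row = []
--         for j in range(len(grid)):
--             row.append(grid[j][i])
--         for digit in row:
--             counter = row.count(digit)
--             if counter > 1:
--                 return False
--             else:
--                 continue
--     return True
-- ===== SOURCE B (Python) =====
-- def vert_check(grid):
--     '''return True if no 2 cells in the same column have the same value, otherwise
--         return False'''
--     n = len(grid)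
--     for i in range(n):
--         seen = set()
--         for j in range(n):
--             v = grid[j][i]
--             if v in seen:
--                 return False
--             seen.add(v)
--     return True
-- ===== Notes on version B (the rewrite author's own statement) =====
-- stated objective: alternative
-- what changed: Each column is checked in one streaming pass with a seen-set (return False on the first repeated value) instead of building the column list and scanning it with list.count per element.
import Mathlib
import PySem

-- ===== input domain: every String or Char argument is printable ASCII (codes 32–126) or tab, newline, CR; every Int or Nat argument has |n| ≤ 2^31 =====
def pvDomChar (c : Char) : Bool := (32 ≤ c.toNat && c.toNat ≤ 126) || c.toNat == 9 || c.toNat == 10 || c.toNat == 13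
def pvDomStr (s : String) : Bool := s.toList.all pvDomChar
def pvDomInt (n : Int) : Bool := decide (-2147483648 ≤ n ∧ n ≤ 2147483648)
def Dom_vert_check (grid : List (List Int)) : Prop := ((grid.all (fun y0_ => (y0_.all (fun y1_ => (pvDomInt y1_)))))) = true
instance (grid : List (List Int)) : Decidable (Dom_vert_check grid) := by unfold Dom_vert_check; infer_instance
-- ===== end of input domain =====

-- B checks each column in one streaming pass with a seen-set (fail on the first repeat),
-- instead of A's build-the-column-then-scan-with-list.count (alternative algorithm).


-- ===== PORT A =====
-- row = []; for j in range(len(grid)): row.append(grid[j][i])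
-- (indexing via pyGetD; Pre_ keeps every access in range, so the defaults are never used)
def aCol (grid : List (List Int)) (i : Int) : List Int :=
  (PySem.List.pyRange 0 grid.length 1).foldl
    (fun row j => row ++ [PySem.List.pyGetD (PySem.List.pyGetD grid j []) i 0]) []

-- for digit in row: counter = row.count(digit); if counter > 1: return False
def aScan (row : List Int) : List Int → Bool
  | [] => true
  | digit :: ds => if PySem.List.count row digit > 1 then false else aScan row ds

-- for i in range(len(grid)): … ; return True
def aGo (grid : List (List Int)) : List Int → Bool
  | [] => true
  | i :: rest =>
    let row := aCol grid i
    if aScan row row then aGo grid rest else false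

def vert_check (grid : List (List Int)) : Bool :=
  aGo grid (PySem.List.pyRange 0 grid.length 1)

-- ===== PORT B =====
-- seen = set(); for j in range(n): v = grid[j][i]; if v in seen: return False; seen.add(v)
def bInner (grid : List (List Int)) (i : Int) : List Int → PySem.Set Int → Bool
  | [], _ => true
  | j :: js, seen =>
    let v := PySem.List.pyGetD (PySem.List.pyGetD grid j []) i 0
    if PySem.Set.contains seen v then false
    else bInner grid i js (PySem.Set.add seen v)

-- for i in range(n): … ; return True
def bGo (grid : List (List Int)) : List Int → Bool
  | [] => true
  | i :: rest =>
    if bInner grid i (PySem.List.pyRange 0 grid.length 1) PySem.Set.empty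
    then bGo grid rest else false

def vert_check_alt (grid : List (List Int)) : Bool :=
  bGo grid (PySem.List.pyRange 0 grid.length 1)

-- ===== PRECONDITION & SPEC =====
-- Pre_ excludes exactly the inputs on which A raises IndexError: ragged grids (some row
-- shorter than len(grid)) unless some fully-accessible column already holds a duplicate,
-- in which case both programs return False before any out-of-range access.
def Pre_vert_check (grid : List (List Int)) : Prop :=
  (∀ row ∈ grid, grid.length ≤ row.length) ∨
  (∃ i < grid.length, (∀ row ∈ grid, i < row.length) ∧
    ¬ (grid.map (fun row => row.getD i 0)).Nodup)
instance (grid : List (List Int)) : Decidable (Pre_vert_check grid) := by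
  unfold Pre_vert_check; infer_instance

def pvWitness_vert_check : List (List Int) := [[1, 2], [2, 1]]

def Spec_vert_check (grid : List (List Int)) (out : Bool) : Prop := out = vert_check_alt grid
instance (grid : List (List Int)) (out : Bool) : Decidable (Spec_vert_check grid out) := by
  unfold Spec_vert_check; infer_instance

-- ===== CLAIM (what is proved, stated in full; the proofs are below) =====
def Claim_equal_vert_check : Prop :=
  ∀ (grid : List (List Int)), Dom_vert_check grid → Pre_vert_check grid →
    Spec_vert_check grid (vert_check grid)

-- ===== LEMMAS AND PROOFS =====

-- A builds the column by append-folding; that is the mapped index list.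
theorem aCol_eq_map (grid : List (List Int)) (i : Int) :
    aCol grid i =
      (PySem.List.pyRange 0 grid.length 1).map
        (fun j => PySem.List.pyGetD (PySem.List.pyGetD grid j []) i 0) := by
  simpa [aCol] using
    (PySem.List.foldl_append_singleton_eq_map
      (fun j => PySem.List.pyGetD (PySem.List.pyGetD grid j []) i 0)
      (PySem.List.pyRange 0 grid.length 1) [])

-- A's digit scan succeeds exactly on duplicate-free rows.
theorem aScan_aux (row : List Int) (ds : List Int) :
    aScan row ds = true ↔ ∀ d ∈ ds, row.count d ≤ 1 := by
  induction ds with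
  | nil => simp [aScan]
  | cons d ds ih =>
    simp only [aScan, PySem.List.count_eq, List.mem_cons]
    by_cases h : List.count d row > 1
    · rw [if_pos h]
      exact ⟨fun hc => absurd hc (by simp),
             fun hall => absurd (hall d (Or.inl rfl)) (by omega)⟩
    · rw [if_neg h, ih]
      constructor
      · intro hall e he
        rcases he with rfl | he'
        · omega
        · exact hall e he'
      · intro hall e he; exact hall e (Or.inr he)

theorem aScan_nodup (row : List Int) :
    aScan row row = true ↔ row.Nodup := by
  rw [aScan_aux, List.nodup_iff_count_le_one]
  constructor
  · intro h a
    by_cases ha : a ∈ row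
    · exact h a ha
    · simp [List.count_eq_zero_of_not_mem ha]
  · intro h d _; exact h d

-- B's streaming seen-set pass succeeds exactly when the mapped values are distinct
-- and disjoint from the initial seen-set.
theorem bInner_iff (grid : List (List Int)) (i : Int) (js : List Int)
    (seen : PySem.Set Int) :
    bInner grid i js seen = true ↔
      (js.map (fun j => PySem.List.pyGetD (PySem.List.pyGetD grid j []) i 0)).Nodup ∧
      ∀ x ∈ js.map (fun j => PySem.List.pyGetD (PySem.List.pyGetD grid j []) i 0),
        x ∉ seen := by
  induction js generalizing seen with
  | nil => simp [bInner]
  | cons j js ih =>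
    simp only [bInner]
    by_cases hmem : (PySem.List.pyGetD (PySem.List.pyGetD grid j []) i 0) ∈ seen
    · rw [if_pos ((PySem.Set.contains_iff _ _).mpr hmem)]
      simp only [List.map_cons, List.mem_cons]
      constructor
      · intro h; cases h
      · rintro ⟨-, hall⟩
        exact absurd hmem (hall _ (Or.inl rfl))
    · rw [if_neg (fun hc => hmem ((PySem.Set.contains_iff _ _).mp hc)), ih]
      simp only [List.map_cons, List.nodup_cons, List.mem_cons, PySem.Set.mem_add]
      constructor
      · rintro ⟨hnd, hall⟩
        refine ⟨⟨fun hv => (hall _ hv) (Or.inr rfl), hnd⟩, ?_⟩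
        rintro x (rfl | hx)
        · exact hmem
        · exact fun hs => (hall x hx) (Or.inl hs)
      · rintro ⟨⟨hvnm, hnd⟩, hall⟩
        refine ⟨hnd, fun x hx h => ?_⟩
        rcases h with hs | rfl
        · exact hall x (Or.inr hx) hs
        · exact hvnm hx

-- Per column: A's scan condition equals B's streaming test.
theorem step_eq (grid : List (List Int)) (i : Int) :
    aScan (aCol grid i) (aCol grid i) =
      bInner grid i (PySem.List.pyRange 0 grid.length 1) PySem.Set.empty := by
  have hA := aScan_nodup (aCol grid i)
  rw [aCol_eq_map] at hA
  have hB := bInner_iff grid i (PySem.List.pyRange 0 grid.length 1) PySem.Set.empty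
  cases hb : bInner grid i (PySem.List.pyRange 0 grid.length 1) PySem.Set.empty with
  | true =>
    rw [aCol_eq_map] at *
    exact hA.mpr ((hB.mp hb).1)
  | false =>
    cases ha : aScan (aCol grid i) (aCol grid i) with
    | false => rfl
    | true =>
      have hnd := hA.mp (by rw [← aCol_eq_map]; exact ha)
      have : bInner grid i (PySem.List.pyRange 0 grid.length 1) PySem.Set.empty = true :=
        hB.mpr ⟨hnd, by intro x hx; simp [PySem.Set.empty]⟩
      rw [hb] at this; exact absurd this (by simp)

theorem go_eq (grid : List (List Int)) (is : List Int) :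
    aGo grid is = bGo grid is := by
  induction is with
  | nil => rfl
  | cons i rest ih =>
    simp only [aGo, bGo, step_eq grid i]
    cases bInner grid i (PySem.List.pyRange 0 grid.length 1) PySem.Set.empty <;> simp [ih]

-- ===== VERDICT (by name: the statement is the Claim_ definition above) =====
theorem vert_check_spec : Claim_equal_vert_check := by
  intro grid _ _
  unfold Spec_vert_check vert_check vert_check_alt
  exact go_eq grid _
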